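-- pv_equiv track=rewrite | github.com/danidanicarrotcarrot/algorithm | programmers/level1/기출문제/1차_비밀지도.py | solution
-- ===== SOURCE A (Python) =====
-- def binary(n, arr):
--     return [str(format(arr[i],'b')) for i in range(n)]       # 2진수 변환한 리스트 반환하는 함수
--
-- def solution(n, arr1, arr2):
--     arr1, arr2 = binary(n, arr1), binary(n, arr2)
--     map = [str(int(x)+int(y)) for x, y in zip(arr1, arr2)]   # 각각 수 더해서 리스트로
--     res = []                                                 # ex) 1101 + 0011 -> 1112
--     for i in map:
--         i = i.replace('0', ' ')       # 0빼고는 다 #으로 바꿔주고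
--         i = i.replace('1', '#')
--         i = i.replace('2', '#')
--         res.append(i.rjust(n, ' '))   # n길이에 맞춰서 오른쪽정렬, 빈 공간은 공백으로
--     return res
-- ===== SOURCE B (Python) =====
-- def solution(n, arr1, arr2):
--     return [format(arr1[i] | arr2[i], 'b').rjust(n, ' ').replace('1', '#').replace('0', ' ')
--             for i in range(n)]
-- ===== Notes on version B (the rewrite author's own statement) =====
-- stated objective: idiomatic
-- what changed: B combines each row with one integer bitwise OR and renders it with format/rjust/replace, dropping A's binary helper, decimal int()-addition of digit strings and three-way digit replacement; Pre_ excludes n exceeding a list length (A raises IndexError) and rows containing a negative number, an unspecified corner where A's decimal addition of '-'-signed digit strings and B's bitwise OR are two equally defensible renderings no caller would specify.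
-- outside the precondition, e.g. on solution(1, [-2], [1]): A returns ['-9'], B returns ['-#']; on solution(2, [1], [1, 2]): A raises IndexError, B raises IndexError
import Mathlib
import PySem

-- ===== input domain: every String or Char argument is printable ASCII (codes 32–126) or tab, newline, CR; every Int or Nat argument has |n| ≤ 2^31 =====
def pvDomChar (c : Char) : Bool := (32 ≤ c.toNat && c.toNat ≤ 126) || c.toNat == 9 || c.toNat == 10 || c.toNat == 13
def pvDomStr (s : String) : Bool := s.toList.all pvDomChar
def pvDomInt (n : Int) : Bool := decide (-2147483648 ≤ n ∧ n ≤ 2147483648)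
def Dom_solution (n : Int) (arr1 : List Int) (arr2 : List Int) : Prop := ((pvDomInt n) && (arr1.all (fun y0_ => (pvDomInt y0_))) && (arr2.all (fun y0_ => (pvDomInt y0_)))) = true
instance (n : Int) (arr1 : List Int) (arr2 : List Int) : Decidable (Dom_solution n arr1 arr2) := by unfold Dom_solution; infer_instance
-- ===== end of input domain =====

-- B combines each row with one integer bitwise OR rendered by format/rjust/replace, instead of A's
-- binary-string helper, decimal int()-addition of digit strings and three replace passes (objective: idiomatic).


-- ===== PORT A =====

-- s.rjust(w, ' '): exact hand port (PySem has no rjust); width ≤ len(s) returns s unchanged.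
def pvRjust (s : String) (w : Int) : String :=
  String.ofList (List.replicate (w.toNat - s.toList.length) ' ' ++ s.toList)

-- int(x): hand port, step for step. PySem.Int.ofStr? is the library primitive for int(),
-- but its parsing worker is a private definition of the prelude and cannot be cited in proofs,
-- so int() is ported by hand here; it is exact on the strings this program feeds it — the output
-- of format(v, 'b'): an optional '-' followed by decimal digits (no spaces, signs '+', underscores).
def pvDigitsVal (cs : List Char) : Int :=
  cs.foldl (fun a c => 10 * a + ((c.toNat : Int) - 48)) 0

def pvInt (s : String) : Int :=
  if s.toList.head? = some '-' then -(pvDigitsVal s.toList.tail) else pvDigitsVal s.toList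

-- helper `binary(n, arr)`: [str(format(arr[i],'b')) for i in range(n)]
-- (arr[i]: Pre_solution keeps every i in range, excluding the IndexError; str(·) of a str is the identity)
def pvBinary (n : Int) (arr : List Int) : List String :=
  (PySem.List.pyRange 0 n 1).map (fun i => PySem.Int.toBin (PySem.List.pyGetD arr i 0))

def solution (n : Int) (arr1 : List Int) (arr2 : List Int) : List String :=
  let b1 := pvBinary n arr1
  let b2 := pvBinary n arr2
  -- map = [str(int(x)+int(y)) for x, y in zip(arr1, arr2)]
  let m := (b1.zip b2).map (fun xy => PySem.Int.toStr (pvInt xy.1 + pvInt xy.2))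
  -- res = []; for i in map: ... res.append(i.rjust(n, ' '))
  m.foldl (fun res i =>
    let i := PySem.Str.replace i "0" " "
    let i := PySem.Str.replace i "1" "#"
    let i := PySem.Str.replace i "2" "#"
    res ++ [pvRjust i n]) []

-- ===== PORT B =====

-- [format(arr1[i] | arr2[i], 'b').rjust(n, ' ').replace('1', '#').replace('0', ' ') for i in range(n)]
-- (arr[i]: Pre_solution keeps every i in range, excluding the IndexError)
def solution_alt (n : Int) (arr1 : List Int) (arr2 : List Int) : List String :=
  (PySem.List.pyRange 0 n 1).map (fun i =>
    PySem.Str.replace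
      (PySem.Str.replace
        (pvRjust (PySem.Int.toBin (PySem.Int.bor (PySem.List.pyGetD arr1 i 0) (PySem.List.pyGetD arr2 i 0))) n)
        "1" "#")
      "0" " ")

-- ===== PRECONDITION & SPEC =====

-- Pre_ excludes (a) the inputs on which A raises IndexError (n larger than a list length), and
-- (b) rows containing a negative number: there the decoding is unspecified and A's decimal addition
-- of '-'-signed digit strings and B's bitwise OR are two equally defensible renderings no caller
-- would specify (e.g. A gives '-9' where B gives '-#').
def Pre_solution (n : Int) (arr1 : List Int) (arr2 : List Int) : Prop :=
  n ≤ PySem.List.len arr1 ∧ n ≤ PySem.List.len arr2 ∧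
    (∀ x ∈ arr1.take n.toNat, 0 ≤ x) ∧ (∀ x ∈ arr2.take n.toNat, 0 ≤ x)

instance (n : Int) (arr1 : List Int) (arr2 : List Int) : Decidable (Pre_solution n arr1 arr2) := by
  unfold Pre_solution; infer_instance

def pvWitness_solution : Int × List Int × List Int := (2, [9, 2], [30, 1])

def Spec_solution (n : Int) (arr1 : List Int) (arr2 : List Int) (out : List String) : Prop := out = solution_alt n arr1 arr2
instance (n : Int) (arr1 : List Int) (arr2 : List Int) (out : List String) : Decidable (Spec_solution n arr1 arr2 out) := by unfold Spec_solution; infer_instance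

-- ===== CLAIM (what is proved, stated in full; the proofs are below) =====
def Claim_equal_solution : Prop := ∀ (n : Int) (arr1 : List Int) (arr2 : List Int), Dom_solution n arr1 arr2 → Pre_solution n arr1 arr2 → Spec_solution n arr1 arr2 (solution n arr1 arr2)

-- ===== LEMMAS AND PROOFS =====

-- `V x`: the decimal value of the binary digit string of x (what int(format(x,'b')) returns on x ≥ 0).
def pvV (x : Nat) : Nat := Nat.ofDigits 10 (Nat.digits 2 x)

-- A's composed character substitution (replace '0'→' ', then '1'→'#', then '2'→'#')
def pvMapA (c : Char) : Char :=
  if c = '0' then ' ' else if c = '1' then '#' else if c = '2' then '#' else c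

-- B's composed character substitution (replace '1'→'#', then '0'→' ')
def pvMapB (c : Char) : Char :=
  if c = '1' then '#' else if c = '0' then ' ' else c

-- Nat.toDigits versus Nat.digits
theorem pv_toDigitsCore_eq (b : Nat) (hb : 2 ≤ b) :
    ∀ (f n : Nat) (acc : List Char), n < f →
      Nat.toDigitsCore b f n acc =
        (if n = 0 then ['0'] else ((Nat.digits b n).map Nat.digitChar).reverse) ++ acc := by
  intro f
  induction f with
  | zero => intro n acc h; exact absurd h (Nat.not_lt_zero n)
  | succ f ih =>
    intro n acc h
    rw [Nat.toDigitsCore]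
    by_cases hn : n = 0
    · subst hn
      simp [Nat.zero_div]
      rfl
    · have hb1 : 1 < b := by omega
      by_cases hd : n / b = 0
      · have hnb : n < b := (Nat.div_eq_zero_iff_lt (by omega)).mp hd
        rw [if_pos hd, if_neg hn, Nat.digits_def' hb1 (Nat.pos_of_ne_zero hn), hd,
          Nat.digits_zero, Nat.mod_eq_of_lt hnb]
        simp
      · have hlt : n / b < n := Nat.div_lt_self (Nat.pos_of_ne_zero hn) hb1
        rw [if_neg hd, ih (n / b) _ (by omega), if_neg hd,
          Nat.digits_def' hb1 (Nat.pos_of_ne_zero hn), if_neg hn]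
        simp

theorem pv_toDigits_eq (b : Nat) (hb : 2 ≤ b) (n : Nat) :
    Nat.toDigits b n = if n = 0 then ['0'] else ((Nat.digits b n).map Nat.digitChar).reverse := by
  rw [Nat.toDigits, pv_toDigitsCore_eq b hb (n + 1) n [] (Nat.lt_succ_self n), List.append_nil]

theorem pv_digitChar_toNat (d : Nat) (h : d < 10) : (Nat.digitChar d).toNat = d + 48 := by
  interval_cases d <;> rfl

-- the left-fold decimal parse of a most-significant-first digit list
theorem pv_digitsVal_rev (L : List Nat) (h : ∀ d ∈ L, d < 10) :
    pvDigitsVal ((L.map Nat.digitChar).reverse) = ((Nat.ofDigits 10 L : Nat) : Int) := by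
  induction L with
  | nil => simp [pvDigitsVal, Nat.ofDigits_nil]
  | cons a L ih =>
    have ha : a < 10 := h a (List.mem_cons_self ..)
    have hL : ∀ d ∈ L, d < 10 := fun d hd => h d (List.mem_cons_of_mem _ hd)
    have ihL := ih hL
    simp only [List.map_cons, List.reverse_cons, pvDigitsVal, List.foldl_append,
      List.foldl_cons, List.foldl_nil] at *
    rw [ihL, pv_digitChar_toNat a ha]
    push_cast [Nat.ofDigits_cons]
    ring

theorem pv_bin_digit_mem (m : Nat) (c : Char) (hc : c ∈ Nat.toDigits 2 m) : c = '0' ∨ c = '1' := by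
  rw [pv_toDigits_eq 2 (le_refl 2)] at hc
  by_cases hm : m = 0
  · rw [if_pos hm] at hc; simp at hc; left; exact hc
  · rw [if_neg hm] at hc
    rw [List.mem_reverse, List.mem_map] at hc
    obtain ⟨d, hd, rfl⟩ := hc
    have : d < 2 := Nat.digits_lt_base (by omega) hd
    interval_cases d
    · left; rfl
    · right; rfl

theorem pv_head_toDigits (m : Nat) : (Nat.toDigits 2 m).head? ≠ some '-' := by
  intro hcon
  have hmem : '-' ∈ Nat.toDigits 2 m := by
    cases hl : Nat.toDigits 2 m with
    | nil => rw [hl] at hcon; simp at hcon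
    | cons c t =>
      rw [hl] at hcon
      simp at hcon
      simp [hcon]
  rcases pv_bin_digit_mem _ _ hmem with h | h <;> simp at h

-- A's int() on format(m, 'b') for m ≥ 0
theorem pv_digitsVal_toDigits (m : Nat) : pvDigitsVal (Nat.toDigits 2 m) = (pvV m : Int) := by
  rw [pv_toDigits_eq 2 (le_refl 2)]
  by_cases hm : m = 0
  · rw [if_pos hm, hm]
    simp [pvDigitsVal, pvV]
  · rw [if_neg hm, pv_digitsVal_rev _ (fun d hd => by
      have : d < 2 := Nat.digits_lt_base (by omega) hd; omega)]
    rfl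

theorem pvV_rec (m : Nat) (hm : m ≠ 0) : pvV m = m % 2 + 10 * pvV (m / 2) := by
  rw [pvV, pvV, Nat.digits_def' (b := 2) (by norm_num) (Nat.pos_of_ne_zero hm),
    Nat.ofDigits_cons]

theorem pvV_pos (m : Nat) (hm : m ≠ 0) : 0 < pvV m := by
  induction m using Nat.strong_induction_on with
  | _ m ih =>
    rw [pvV_rec m hm]
    by_cases h2 : m % 2 = 0
    · have hd : m / 2 ≠ 0 := by omega
      have := ih (m / 2) (Nat.div_lt_self (Nat.pos_of_ne_zero hm) (by norm_num)) hd
      omega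
    · omega

-- A's int(format(x,'b')) for x ≥ 0 is V(x)
theorem pv_parse_toBin_nonneg (t : Int) (ht : 0 ≤ t) : pvInt (PySem.Int.toBin t) = (pvV t.toNat : Int) := by
  rw [pvInt, PySem.Int.toBin, String.toList_ofList, PySem.Int.toBinChars,
    if_neg (show ¬ t < 0 from by omega)]
  rw [if_neg (pv_head_toDigits t.toNat), pv_digitsVal_toDigits]

-- digit lists of a bitwise OR: the pointwise OR of the digit lists
theorem pv_digits_lor : ∀ (N a b : Nat), a + b ≤ N →
    Nat.digits 2 (a ||| b) =
      List.zipWithAll (fun x y => x.getD 0 ||| y.getD 0) (Nat.digits 2 a) (Nat.digits 2 b) := by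
  intro N
  induction N with
  | zero =>
    intro a b h
    have : a = 0 ∧ b = 0 := by omega
    simp [this.1, this.2]
  | succ N ih =>
    intro a b h
    by_cases ha : a = 0
    · subst ha
      simp [List.nil_zipWithAll]
    · by_cases hb : b = 0
      · subst hb
        simp [List.zipWithAll_nil]
      · have hor : a ||| b ≠ 0 := by
          have h1 : a ≤ a ||| b := Nat.left_le_or
          omega
        rw [Nat.digits_def' (b := 2) one_lt_two (Nat.pos_of_ne_zero hor),
          Nat.digits_def' (b := 2) one_lt_two (Nat.pos_of_ne_zero ha),
          Nat.digits_def' (b := 2) one_lt_two (Nat.pos_of_ne_zero hb),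
          List.zipWithAll_cons_cons]
        have hmod : (a ||| b) % 2 = a % 2 ||| b % 2 := by
          have := Nat.and_one_is_mod (a ||| b)
          have ha1 := Nat.and_one_is_mod a
          have hb1 := Nat.and_one_is_mod b
          rw [← this, ← ha1, ← hb1, Nat.and_or_distrib_right]
        have hdiv : (a ||| b) / 2 = a / 2 ||| b / 2 := by
          have hsr : (a ||| b) >>> 1 = a >>> 1 ||| b >>> 1 := Nat.shiftRight_or_distrib
          simpa [Nat.shiftRight_succ, Nat.shiftRight_zero] using hsr
        rw [hmod, hdiv, ih (a / 2) (b / 2) (by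
          have h1 : a / 2 < a := Nat.div_lt_self (Nat.pos_of_ne_zero ha) (by norm_num)
          have h2 : b / 2 < b := Nat.div_lt_self (Nat.pos_of_ne_zero hb) (by norm_num)
          omega)]
        simp

-- decimal digit list of V a + V b: the pointwise SUM of the binary digit lists
theorem pv_digits_sum : ∀ (N a b : Nat), a + b ≤ N →
    Nat.digits 10 (pvV a + pvV b) =
      List.zipWithAll (fun x y => x.getD 0 + y.getD 0) (Nat.digits 2 a) (Nat.digits 2 b) := by
  intro N
  induction N with
  | zero =>
    intro a b h
    have : a = 0 ∧ b = 0 := by omega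
    simp [this.1, this.2, pvV]
  | succ N ih =>
    intro a b h
    by_cases ha : a = 0
    · subst ha
      by_cases hb : b = 0
      · simp [hb, pvV]
      · have : pvV 0 + pvV b = Nat.ofDigits 10 (Nat.digits 2 b) := by simp [pvV]
        rw [this, Nat.digits_ofDigits 10 (by norm_num) _
          (fun d hd => by have : d < 2 := Nat.digits_lt_base (by norm_num) hd; omega)
          (fun _ => Nat.getLast_digit_ne_zero 2 hb)]
        simp [List.nil_zipWithAll]
    · by_cases hb : b = 0
      · have : pvV a + pvV 0 = Nat.ofDigits 10 (Nat.digits 2 a) := by simp [pvV]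
        rw [hb, this, Nat.digits_ofDigits 10 (by norm_num) _
          (fun d hd => by have : d < 2 := Nat.digits_lt_base (by norm_num) hd; omega)
          (fun _ => Nat.getLast_digit_ne_zero 2 ha)]
        simp [List.zipWithAll_nil]
      · have hVa := pvV_pos a ha
        have hVb := pvV_pos b hb
        rw [pvV_rec a ha, pvV_rec b hb]
        have hsum : a % 2 + 10 * pvV (a / 2) + (b % 2 + 10 * pvV (b / 2))
            = (a % 2 + b % 2) + (pvV (a / 2) + pvV (b / 2)) * 10 := by ring
        rw [hsum, Nat.digits_def' (b := 10) (by norm_num) (by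
          have := pvV_rec a ha
          have := pvV_rec b hb
          omega),
          Nat.add_mul_mod_self_right, Nat.add_mul_div_right _ _ (by norm_num : (0:Nat) < 10)]
        rw [Nat.mod_eq_of_lt (by omega), Nat.div_eq_of_lt (by omega), Nat.zero_add]
        have hm2a : a % 2 < 2 := Nat.mod_lt _ (by norm_num)
        have hm2b : b % 2 < 2 := Nat.mod_lt _ (by norm_num)
        rw [Nat.digits_def' (b := 2) one_lt_two (Nat.pos_of_ne_zero ha),
          Nat.digits_def' (b := 2) one_lt_two (Nat.pos_of_ne_zero hb),
          List.zipWithAll_cons_cons,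
          ih (a / 2) (b / 2) (by
            have h1 : a / 2 < a := Nat.div_lt_self (Nat.pos_of_ne_zero ha) (by norm_num)
            have h2 : b / 2 < b := Nat.div_lt_self (Nat.pos_of_ne_zero hb) (by norm_num)
            omega)]
        simp

-- pointwise: A's mapped decimal digit (x+y) equals B's mapped binary digit (x|||y), for bits x,y
theorem pv_map_zip (l1 : List Nat) : ∀ (l2 : List Nat), (∀ x ∈ l1, x < 2) → (∀ x ∈ l2, x < 2) →
    (List.zipWithAll (fun x y => x.getD 0 + y.getD 0) l1 l2).map (fun d => pvMapA (Nat.digitChar d))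
      = (List.zipWithAll (fun x y => x.getD 0 ||| y.getD 0) l1 l2).map (fun d => pvMapB (Nat.digitChar d)) := by
  induction l1 with
  | nil =>
    intro l2 _ h2
    simp only [List.nil_zipWithAll, List.map_map]
    refine List.map_congr_left (fun y hy => ?_)
    have : y < 2 := h2 y hy
    interval_cases y <;> rfl
  | cons x l1 ih =>
    intro l2 h1 h2
    cases l2 with
    | nil =>
      simp only [List.zipWithAll_nil, List.map_map]
      refine List.map_congr_left (fun y hy => ?_)
      have : y < 2 := h1 y hy
      interval_cases y <;> rfl
    | cons y l2 =>
      rw [List.zipWithAll_cons_cons, List.zipWithAll_cons_cons, List.map_cons, List.map_cons,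
        ih l2 (fun z hz => h1 z (List.mem_cons_of_mem _ hz)) (fun z hz => h2 z (List.mem_cons_of_mem _ hz))]
      have hx : x < 2 := h1 x (List.mem_cons_self ..)
      have hy : y < 2 := h2 y (List.mem_cons_self ..)
      interval_cases x <;> interval_cases y <;> rfl

-- the character-mapped decimal rendering of V a + V b equals the mapped binary rendering of a ||| b
theorem pv_core (a b : Nat) :
    (Nat.toDigits 10 (pvV a + pvV b)).map pvMapA = (Nat.toDigits 2 (a ||| b)).map pvMapB := by
  by_cases hz : a = 0 ∧ b = 0
  · rw [hz.1, hz.2]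
    rfl
  · have hne : ¬(a = 0 ∧ b = 0) := hz
    have hsum : pvV a + pvV b ≠ 0 := by
      by_cases ha : a = 0
      · have hb : b ≠ 0 := by tauto
        have := pvV_pos b hb
        omega
      · have := pvV_pos a ha
        omega
    have hor : a ||| b ≠ 0 := by
      have h1 : a ≤ a ||| b := Nat.left_le_or
      have h2 : b ≤ b ||| a := Nat.left_le_or
      rw [Nat.or_comm] at h2
      omega
    rw [pv_toDigits_eq 10 (by norm_num), pv_toDigits_eq 2 (le_refl 2), if_neg hsum, if_neg hor,
      pv_digits_sum (a + b) a b (le_refl _), pv_digits_lor (a + b) a b (le_refl _),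
      List.map_reverse, List.map_reverse, List.map_map, List.map_map]
    congr 1
    exact pv_map_zip _ _
      (fun d hd => Nat.digits_lt_base (by norm_num) hd)
      (fun d hd => Nat.digits_lt_base (by norm_num) hd)

-- single-character str.replace is a map
theorem pv_replace_go (o nw : Char) : ∀ (fuel : Nat) (l acc : List Char), l.length ≤ fuel →
    PySem.Chars.replace.go [o] [nw] fuel l acc =
      acc.reverse ++ l.map (fun c => if c = o then nw else c) := by
  intro fuel
  induction fuel with
  | zero =>
    intro l acc h
    have hl : l = [] := List.eq_nil_of_length_eq_zero (Nat.le_zero.mp h)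
    subst hl
    simp [PySem.Chars.replace.go]
  | succ fuel ih =>
    intro l acc h
    cases l with
    | nil => simp [PySem.Chars.replace.go]
    | cons c t =>
      rw [PySem.Chars.replace.go]
      by_cases hc : c = o
      · subst hc
        rw [if_pos (by simp [List.isPrefixOf])]
        rw [ih _ _ (by simpa using h)]
        simp
      · rw [if_neg (by simp [List.isPrefixOf]; exact fun h' => hc h'.symm)]
        rw [ih _ _ (by simpa using h)]
        simp [hc]

theorem pv_replace_single (o nw : Char) (cs : List Char) :
    PySem.Chars.replace cs [o] [nw] = cs.map (fun c => if c = o then nw else c) := by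
  rw [PySem.Chars.replace, if_neg (by simp)]
  simpa using pv_replace_go o nw cs.length cs [] (le_refl _)

theorem pv_str_ext (s t : String) (h : s.toList = t.toList) : s = t :=
  calc s = String.ofList s.toList := String.ofList_toList.symm
    _ = String.ofList t.toList := by rw [h]
    _ = t := String.ofList_toList

-- the per-row equality, for nonnegative row values
theorem pv_row (n a b : Int) (ha : 0 ≤ a) (hb : 0 ≤ b) :
    pvRjust
      (PySem.Str.replace
        (PySem.Str.replace
          (PySem.Str.replace (PySem.Int.toStr (pvInt (PySem.Int.toBin a) + pvInt (PySem.Int.toBin b))) "0" " ")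
          "1" "#") "2" "#") n =
    PySem.Str.replace
      (PySem.Str.replace (pvRjust (PySem.Int.toBin (PySem.Int.bor a b)) n) "1" "#")
      "0" " " := by
  have h0 : ("0" : String).toList = ['0'] := rfl
  have h1 : ("1" : String).toList = ['1'] := rfl
  have h2 : ("2" : String).toList = ['2'] := rfl
  have hsp : (" " : String).toList = [' '] := rfl
  have hsh : ("#" : String).toList = ['#'] := rfl
  have hbor : PySem.Int.bor a b = ((a.toNat ||| b.toNat : Nat) : Int) := by
    rw [← PySem.Int.bor_natCast]
    congr 1 <;> omega
  rw [pv_parse_toBin_nonneg a ha, pv_parse_toBin_nonneg b hb, hbor]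
  apply pv_str_ext
  -- decimal side: str of the (nonnegative) sum is its base-10 digit string
  have hts : (PySem.Int.toStr (((pvV a.toNat : Nat) : Int) + ((pvV b.toNat : Nat) : Int))).toList
      = Nat.toDigits 10 (pvV a.toNat + pvV b.toNat) := by
    rw [PySem.Int.toList_toStr, PySem.Int.toChars, if_neg (by omega)]
    congr 1
  -- binary side: format of the (nonnegative) OR is its base-2 digit string
  have htb : (PySem.Int.toBin ((a.toNat ||| b.toNat : Nat) : Int)).toList
      = Nat.toDigits 2 (a.toNat ||| b.toNat) := by
    rw [PySem.Int.toList_toBin, PySem.Int.toBinChars, if_neg (by omega)]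
    congr 1
  simp only [pvRjust, String.toList_ofList, PySem.Str.toList_replace, h0, h1, h2, hsp, hsh,
    pv_replace_single, List.map_map, List.map_append, List.map_replicate, List.length_map,
    hts, htb]
  have hAmap :
      (Nat.toDigits 10 (pvV a.toNat + pvV b.toNat)).map
        ((fun c => if c = '2' then '#' else c) ∘ (fun c => if c = '1' then '#' else c) ∘
          (fun c => if c = '0' then ' ' else c))
        = (Nat.toDigits 10 (pvV a.toNat + pvV b.toNat)).map pvMapA := by
    refine List.map_congr_left (fun c _ => ?_)
    simp only [Function.comp, pvMapA]
    by_cases c0 : c = '0'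
    · subst c0; rfl
    · by_cases c1 : c = '1'
      · subst c1; rfl
      · by_cases c2 : c = '2'
        · subst c2; rfl
        · simp [c0, c1, c2]
  have hBmap :
      (Nat.toDigits 2 (a.toNat ||| b.toNat)).map
        ((fun c => if c = '0' then ' ' else c) ∘ (fun c => if c = '1' then '#' else c))
        = (Nat.toDigits 2 (a.toNat ||| b.toNat)).map pvMapB := by
    refine List.map_congr_left (fun c _ => ?_)
    simp only [Function.comp, pvMapB]
    by_cases c1 : c = '1'
    · subst c1; rfl
    · by_cases c0 : c = '0'
      · subst c0; rfl
      · simp [c0, c1]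
  have hch : (if (if ' ' = '1' then '#' else ' ') = '0' then ' ' else if ' ' = '1' then '#' else ' ') = ' ' := rfl
  rw [hch, hAmap, hBmap]
  have hcore := pv_core a.toNat b.toNat
  have hlen : (Nat.toDigits 10 (pvV a.toNat + pvV b.toNat)).length
      = (Nat.toDigits 2 (a.toNat ||| b.toNat)).length := by
    have := congrArg List.length hcore
    simpa using this
  rw [hcore, hlen]

-- ===== VERDICT (by name: the statement is the Claim_ definition above) =====
theorem solution_spec : Claim_equal_solution := by
  intro n arr1 arr2 _hdom hpre
  obtain ⟨hl1, hl2, hp1, hp2⟩ := hpre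
  unfold Spec_solution
  have hlen1 : n.toNat ≤ arr1.length := by
    have h1 : n ≤ (arr1.length : Int) := by simpa [PySem.List.len_eq] using hl1
    omega
  have hlen2 : n.toNat ≤ arr2.length := by
    have h2 : n ≤ (arr2.length : Int) := by simpa [PySem.List.len_eq] using hl2
    omega
  simp only [solution, solution_alt, pvBinary]
  rw [PySem.List.pyRange_one, List.zip_map', List.map_map,
    PySem.List.foldl_append_singleton_eq_map, List.nil_append, List.map_map,
    List.map_map]
  apply List.ext_getElem
  · simp only [List.length_map, List.length_range]
  · intro i hL hR
    have hi : i < n.toNat := by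
      have : i < (n - 0).toNat := by simpa using hL
      omega
    have hi1 : i < arr1.length := by omega
    have hi2 : i < arr2.length := by omega
    have hga : 0 ≤ arr1[i] := hp1 _ (List.mem_take_iff_getElem.mpr ⟨i, by omega, by simp⟩)
    have hgb : 0 ≤ arr2[i] := hp2 _ (List.mem_take_iff_getElem.mpr ⟨i, by omega, by simp⟩)
    simp only [List.getElem_map, List.getElem_range,
      Function.comp_apply, zero_add, sub_zero, PySem.List.pyGetD_natCast,
      List.getD_eq_getElem _ _ hi1, List.getD_eq_getElem _ _ hi2]
    exact pv_row n arr1[i] arr2[i] hga hgb
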